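-- pv_equiv track=rewrite | github.com/rmscoal/algoDS | python/leetcode/arrays/left_right_sum.py | left_right_difference_v2
-- ===== SOURCE A (Python) =====
-- from typing import List
--
-- def left_right_difference_v2(nums: List[int]) -> List[int]:
--     left_cursor = 0
--     right_cursor = 0
--     answer = [0 for _ in range(len(nums))]
--
--     for i in range(1, len(nums)):
--         right_cursor += nums[i]
--
--     for i in range(len(nums)):
--         if i != 0:
--             left_cursor += nums[i-1]
--             right_cursor -= nums[i]
--
--         answer[i] = abs(left_cursor - right_cursor)
--
--     return answer
-- ===== SOURCE B (Python) =====
-- from typing import List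
--
-- def left_right_difference_v2(nums: List[int]) -> List[int]:
--     n = len(nums)
--     answer = [0] * n
--     run = 0
--     for i in range(n):
--         answer[i] = run
--         run += nums[i]
--     run = 0
--     for i in range(n - 1, -1, -1):
--         answer[i] = abs(answer[i] - run)
--         run += nums[i]
--     return answer
-- ===== Notes on version B (the rewrite author's own statement) =====
-- stated objective: alternative
-- what changed: Replaces A's pre-computed total with an in-place bidirectional sweep: a forward pass writes each left sum into the answer array, then a backward pass (reverse traversal, no total) combines it with a running right sum via abs; A instead sums the tail up front and threads two cursors in a single forward pass.
import Mathlib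
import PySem

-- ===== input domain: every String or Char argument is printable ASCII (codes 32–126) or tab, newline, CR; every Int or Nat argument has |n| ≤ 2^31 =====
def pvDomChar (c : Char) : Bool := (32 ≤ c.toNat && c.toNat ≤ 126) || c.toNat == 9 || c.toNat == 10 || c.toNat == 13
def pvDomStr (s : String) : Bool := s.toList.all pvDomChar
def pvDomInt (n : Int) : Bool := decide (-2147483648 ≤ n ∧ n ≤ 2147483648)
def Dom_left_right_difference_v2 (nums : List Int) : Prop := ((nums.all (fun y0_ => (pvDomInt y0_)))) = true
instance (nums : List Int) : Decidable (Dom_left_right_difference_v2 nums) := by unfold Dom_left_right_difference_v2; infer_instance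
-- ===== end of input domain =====

-- B replaces A's up-front tail total and single forward pass with two cursors by an
-- in-place bidirectional sweep: a forward pass writes left sums into the answer, a
-- backward pass combines them with a running right sum; alternative decomposition, same O(n).

-- ===== PORT A =====
-- A's first for-loop (accumulating right_cursor), lifted to a named helper
def pvRight0 (nums : List Int) : Int :=
  (PySem.List.pyRange 1 (nums.length : Int) 1).foldl
    (fun rc i => rc + PySem.List.pyGetD nums i 0) 0

-- loop body of A's second for-loop, lifted to a named helper
def pvStepA (nums : List Int) (s : Int × Int × List Int) (i : Int) : Int × Int × List Int :=
  let lc := if i ≠ 0 then s.1 + PySem.List.pyGetD nums (i - 1) 0 else s.1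
  let rc := if i ≠ 0 then s.2.1 - PySem.List.pyGetD nums i 0 else s.2.1
  (lc, rc, PySem.List.pySetD s.2.2 i |lc - rc|)

def left_right_difference_v2 (nums : List Int) : List Int :=
  ((PySem.List.pyRange 0 (nums.length : Int) 1).foldl (pvStepA nums)
      (0, pvRight0 nums, List.replicate nums.length 0)).2.2

-- ===== PORT B =====
-- B's forward loop body: answer[i] = run; run += nums[i]
def pvStepB1 (nums : List Int) (s : Int × List Int) (i : Int) : Int × List Int :=
  (s.1 + PySem.List.pyGetD nums i 0, PySem.List.pySetD s.2 i s.1)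

-- B's backward loop body: answer[i] = abs(answer[i] - run); run += nums[i]
def pvStepB2 (nums : List Int) (s : Int × List Int) (i : Int) : Int × List Int :=
  (s.1 + PySem.List.pyGetD nums i 0,
   PySem.List.pySetD s.2 i |PySem.List.pyGetD s.2 i 0 - s.1|)

def left_right_difference_v2_alt (nums : List Int) : List Int :=
  let n := (nums.length : Int)
  let fwd := (PySem.List.pyRange 0 n 1).foldl (pvStepB1 nums) (0, List.replicate nums.length 0)
  ((PySem.List.pyRange (n - 1) (-1) (-1)).foldl (pvStepB2 nums) (0, fwd.2)).2

-- ===== PRECONDITION & SPEC =====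
def Spec_left_right_difference_v2 (nums : List Int) (out : List Int) : Prop := out = left_right_difference_v2_alt nums
instance (nums : List Int) (out : List Int) : Decidable (Spec_left_right_difference_v2 nums out) := by unfold Spec_left_right_difference_v2; infer_instance

-- ===== CLAIM (what is proved, stated in full; the proofs are below) =====
def Claim_equal_left_right_difference_v2 : Prop := ∀ (nums : List Int), Dom_left_right_difference_v2 nums → Spec_left_right_difference_v2 nums (left_right_difference_v2 nums)

-- ===== LEMMAS AND PROOFS =====

-- prefix sum of the first k elements
def pvS (nums : List Int) (k : Nat) : Int := (nums.take k).sum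
-- the common value of answer[k]
def pvOut (nums : List Int) (k : Nat) : Int := |2 * pvS nums k + nums.getD k 0 - nums.sum|
-- A's answer array after the first k iterations of the second loop
def pvAnsK (nums : List Int) (k : Nat) : List Int :=
  (List.range nums.length).map (fun j => if j < k then pvOut nums j else 0)
-- B's answer array after the first k iterations of the forward loop
def pvPre (nums : List Int) (k : Nat) : List Int :=
  (List.range nums.length).map (fun j => if j < k then pvS nums j else 0)
-- B's answer array after the backward loop has processed indices n-1 … k
def pvMix (nums : List Int) (k : Nat) : List Int :=
  (List.range nums.length).map (fun j => if j < k then pvS nums j else pvOut nums j)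

theorem pvS_succ (nums : List Int) (k : Nat) (h : k < nums.length) :
    pvS nums (k + 1) = pvS nums k + nums.getD k 0 := by
  unfold pvS
  rw [List.take_add_one, List.sum_append, List.getElem?_eq_getElem h]
  simp [List.getD_eq_getElem?_getD, List.getElem?_eq_getElem h]

theorem pvS_drop (nums : List Int) (k : Nat) :
    (nums.drop k).sum = nums.sum - pvS nums k := by
  have := List.sum_take_add_sum_drop nums k
  unfold pvS
  omega

-- ===== A-side lemmas =====

theorem ansK_set (nums : List Int) (k : Nat) (h : k < nums.length) :
    (pvAnsK nums k).set k (pvOut nums k) = pvAnsK nums (k + 1) := by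
  rw [List.ext_getElem_iff]
  constructor
  · simp [pvAnsK]
  · intro i h1 h2
    simp only [pvAnsK, List.length_set, List.length_map, List.length_range] at h1
    rw [List.getElem_set]
    simp only [pvAnsK, List.getElem_map, List.getElem_range]
    split_ifs <;> first | rfl | omega | (subst_vars; rfl)

theorem loopA (nums : List Int) (hne : nums ≠ []) (k : Nat) (h1 : 1 ≤ k) (h2 : k ≤ nums.length) :
    (PySem.List.pyRange 0 (k : Int) 1).foldl (pvStepA nums)
        (0, nums.sum - pvS nums 1, List.replicate nums.length 0)
      = (pvS nums (k - 1), nums.sum - pvS nums k, pvAnsK nums k) := by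
  induction k with
  | zero => omega
  | succ k ih =>
    by_cases hk : k = 0
    · subst hk
      have h0 : 0 < nums.length := by
        cases nums with
        | nil => exact absurd rfl hne
        | cons a l => simp
      rw [(by norm_num : ((0 + 1 : Nat) : Int) = (0 : Int) + 1),
        PySem.List.pyRange_one_singleton, List.foldl_cons, List.foldl_nil]
      unfold pvStepA
      simp only [ne_eq, not_true_eq_false, if_false]
      push_cast
      have hg : pvS nums 1 = nums.getD 0 0 := by
        have := pvS_succ nums 0 h0
        simpa [pvS] using this
      have hrep : (List.replicate nums.length (0:Int)) = pvAnsK nums 0 := by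
        simp [pvAnsK, List.map_const']
      rw [hrep, (by norm_num : (0:Int) = ((0:Nat):Int)), PySem.List.pySetD_natCast]
      have hout : |0 - (nums.sum - pvS nums 1)| = pvOut nums 0 := by
        rw [hg]
        simp only [pvOut, pvS, List.take_zero, List.sum_nil]
        congr 1
        ring
      simp only [Prod.mk.injEq, Nat.cast_zero]
      refine ⟨by simp [pvS], trivial, ?_⟩
      rw [hout, ansK_set nums 0 h0]
    · have hk1 : 1 ≤ k := by omega
      have hcast : ((k + 1 : Nat) : Int) = (k : Int) + 1 := by push_cast; ring
      rw [hcast, PySem.List.pyRange_one_succ_right (by positivity), List.foldl_append,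
        List.foldl_cons, List.foldl_nil, ih hk1 (by omega)]
      unfold pvStepA
      have hkz : (k : Int) ≠ 0 := by exact_mod_cast hk
      simp only [ne_eq, hkz, not_false_eq_true, if_pos]
      rw [(by omega : ((k : Int) - 1) = ((k - 1 : Nat) : Int)), PySem.List.pyGetD_natCast,
        PySem.List.pyGetD_natCast, PySem.List.pySetD_natCast]
      have hS : pvS nums k = pvS nums (k - 1) + nums.getD (k - 1) 0 := by
        have := pvS_succ nums (k - 1) (by omega)
        rw [(by omega : k - 1 + 1 = k)] at this
        exact this
      have hS2 : pvS nums (k + 1) = pvS nums k + nums.getD k 0 := pvS_succ nums k (by omega)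
      have hout : |pvS nums (k - 1) + nums.getD (k - 1) 0 -
          (nums.sum - pvS nums k - nums.getD k 0)| = pvOut nums k := by
        simp only [pvOut, ← hS]
        congr 1
        ring
      rw [hout, ansK_set nums k (by omega)]
      simp only [Prod.mk.injEq, Nat.add_sub_cancel, and_true]
      exact ⟨by omega, by omega⟩

theorem right0_eq (nums : List Int) :
    pvRight0 nums = nums.sum - pvS nums 1 := by
  unfold pvRight0
  rw [PySem.List.foldl_pyRange_pyGetD' nums 0 (fun acc v => acc + v) 0 (by norm_num)]
  have h1 : (1 : Int).toNat = 1 := rfl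
  rw [h1]
  have hfold : (nums.drop 1).foldl (fun acc v => acc + v) 0 = (nums.drop 1).sum := by
    simp [List.sum_eq_foldl]
  rw [hfold, pvS_drop]

theorem A_eq (nums : List Int) :
    left_right_difference_v2 nums = (List.range nums.length).map (pvOut nums) := by
  unfold left_right_difference_v2
  by_cases hne : nums = []
  · subst hne
    simp [pvRight0]
  · have hlen : 1 ≤ nums.length := by
      cases nums with | nil => simp at hne | cons a l => simp
    rw [right0_eq, loopA nums hne nums.length hlen (le_refl _)]
    apply List.map_congr_left
    intro j hj
    simp only [List.mem_range] at hj
    simp [hj]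

-- ===== B-side lemmas =====

theorem pre_set (nums : List Int) (k : Nat) (h : k < nums.length) :
    (pvPre nums k).set k (pvS nums k) = pvPre nums (k + 1) := by
  rw [List.ext_getElem_iff]
  constructor
  · simp [pvPre]
  · intro i h1 h2
    simp only [pvPre, List.length_set, List.length_map, List.length_range] at h1
    rw [List.getElem_set]
    simp only [pvPre, List.getElem_map, List.getElem_range]
    split_ifs <;> first | rfl | omega | (subst_vars; rfl)

theorem mix_set (nums : List Int) (k : Nat) (h : k < nums.length) :
    (pvMix nums (k + 1)).set k (pvOut nums k) = pvMix nums k := by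
  rw [List.ext_getElem_iff]
  constructor
  · simp [pvMix]
  · intro i h1 h2
    simp only [pvMix, List.length_set, List.length_map, List.length_range] at h1
    rw [List.getElem_set]
    simp only [pvMix, List.getElem_map, List.getElem_range]
    split_ifs <;> first | rfl | omega | (subst_vars; rfl)

theorem loopB1 (nums : List Int) (k : Nat) (hk : k ≤ nums.length) :
    (PySem.List.pyRange 0 (k : Int) 1).foldl (pvStepB1 nums)
        (0, List.replicate nums.length 0)
      = (pvS nums k, pvPre nums k) := by
  induction k with
  | zero =>
    simp [pvS, pvPre, List.map_const']
  | succ k ih =>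
    have hcast : ((k + 1 : Nat) : Int) = (k : Int) + 1 := by push_cast; ring
    rw [hcast, PySem.List.pyRange_one_succ_right (by positivity), List.foldl_append,
      List.foldl_cons, List.foldl_nil, ih (by omega)]
    unfold pvStepB1
    rw [PySem.List.pyGetD_natCast, PySem.List.pySetD_natCast]
    rw [pvS_succ nums k (by omega), pre_set nums k (by omega)]

theorem loopB2 (nums : List Int) (m : Nat) (hm : m ≤ nums.length) :
    (PySem.List.pyRange ((nums.length : Int) - 1) (((nums.length - m : Nat) : Int) - 1) (-1)).foldl
        (pvStepB2 nums) (0, pvMix nums nums.length)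
      = ((nums.drop (nums.length - m)).sum, pvMix nums (nums.length - m)) := by
  induction m with
  | zero =>
    rw [PySem.List.pyRange_neg_one_eq_nil (by simp), List.foldl_nil]
    simp
  | succ m ih =>
    have hk : nums.length - (m + 1) < nums.length := by omega
    set k := nums.length - (m + 1) with hkdef
    have hkm : nums.length - m = k + 1 := by omega
    have hsplit : PySem.List.pyRange ((nums.length : Int) - 1) ((k : Int) - 1) (-1)
        = PySem.List.pyRange ((nums.length : Int) - 1) ((k : Int)) (-1) ++ [(k : Int)] := by
      rw [PySem.List.pyRange_neg_one_eq_reverse, PySem.List.pyRange_neg_one_eq_reverse]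
      rw [(by ring : ((k : Int) - 1) + 1 = (k : Int)),
        PySem.List.pyRange_one_cons (by omega)]
      simp
    have ih' := ih (by omega)
    rw [hkm, (by push_cast; ring : (((k + 1 : Nat)) : Int) - 1 = (k : Int))] at ih'
    rw [hsplit, List.foldl_append, ih', List.foldl_cons, List.foldl_nil]
    unfold pvStepB2
    rw [PySem.List.pyGetD_natCast, PySem.List.pyGetD_natCast, PySem.List.pySetD_natCast]
    have hget : (pvMix nums (k + 1)).getD k 0 = pvS nums k := by
      simp [pvMix, List.getD_eq_getElem?_getD, hk]
    have hrun : (nums.drop (k + 1)).sum + nums.getD k 0 = (nums.drop k).sum := by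
      rw [pvS_drop, pvS_drop, pvS_succ nums k hk]
      ring
    have hout : |(pvMix nums (k + 1)).getD k 0 - (nums.drop (k + 1)).sum| = pvOut nums k := by
      rw [hget, pvS_drop, pvS_succ nums k hk]
      simp only [pvOut]
      congr 1
      ring
    rw [hout, hrun, mix_set nums k hk]

theorem B_eq (nums : List Int) :
    left_right_difference_v2_alt nums = (List.range nums.length).map (pvOut nums) := by
  unfold left_right_difference_v2_alt
  simp only
  have hpm : pvPre nums nums.length = pvMix nums nums.length := by
    apply List.map_congr_left
    intro j hj
    simp only [List.mem_range] at hj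
    simp [hj]
  have hfull := loopB2 nums nums.length (le_refl _)
  simp only [Nat.sub_self, Nat.cast_zero, List.drop_zero] at hfull
  norm_num at hfull
  rw [loopB1 nums nums.length (le_refl _),
    show ((pvS nums nums.length, pvPre nums nums.length).2 : List Int)
      = pvMix nums nums.length from hpm,
    hfull]
  apply List.map_congr_left
  intro j hj
  simp only [List.mem_range] at hj
  simp

-- ===== VERDICT (by name: the statement is the Claim_ definition above) =====
theorem left_right_difference_v2_spec : Claim_equal_left_right_difference_v2 := by
  intro nums _
  unfold Spec_left_right_difference_v2
  rw [A_eq, B_eq]
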